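-- pv_equiv track=rewrite | github.com/Lucassarantes/codesignal | test_22.py | solution
-- ===== SOURCE A (Python) =====
-- def solution(inputArray):
--     coordinates = sorted(inputArray)
--     jump = 1
--     while True:
--         jumping = True
--         for obstacle in coordinates:
--             if obstacle % jump == 0:
--                 jumping = False
--                 break
--         if jumping:
--             return jump
--         jump += 1
-- ===== SOURCE B (Python) =====
-- def solution(inputArray):
--     # Collect every positive divisor of every obstacle (via trial division up
--     # to the square root), then return the smallest positive integer that is
--     # not such a divisor.
--     divisors = set()
--     for x in inputArray:
--         n = abs(x)
--         d = 1
--         while d * d <= n: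
--             if n % d == 0:
--                 divisors.add(d)
--                 divisors.add(n // d)
--             d += 1
--     j = 1
--     while j in divisors:
--         j += 1
--     return j
-- ===== Notes on version B (the rewrite author's own statement) =====
-- stated objective: alternative
-- what changed: Instead of testing every candidate jump against every obstacle with a modulo scan, B enumerates each obstacle's divisors once by trial division up to the square root and returns the mex (smallest positive non-member) of that divisor set; Pre_ excludes lists containing 0, on which A loops forever while B returns.
import Mathlib
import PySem

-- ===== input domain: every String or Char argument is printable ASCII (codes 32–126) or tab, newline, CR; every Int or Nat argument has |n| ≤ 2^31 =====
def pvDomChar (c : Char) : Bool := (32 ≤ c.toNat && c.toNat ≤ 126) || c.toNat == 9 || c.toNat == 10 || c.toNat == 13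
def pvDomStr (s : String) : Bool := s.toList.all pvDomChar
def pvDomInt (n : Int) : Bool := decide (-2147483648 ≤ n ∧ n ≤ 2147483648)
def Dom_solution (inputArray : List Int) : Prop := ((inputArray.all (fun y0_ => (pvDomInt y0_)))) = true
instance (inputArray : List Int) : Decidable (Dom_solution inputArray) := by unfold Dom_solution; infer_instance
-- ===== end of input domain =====

-- B replaces A's per-jump modulo scan over the obstacles by collecting every positive
-- divisor of every obstacle once (trial division up to the square root) and returning
-- the smallest positive integer outside that set (objective: alternative, not faster).

-- ===== PORT A =====
-- Python's `while True` is totalized with fuel; under Pre_ (no zero obstacle) the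
-- loop provably returns by jump = max|obstacle| + 1, which this fuel covers.
def pvWhileA (coords : List Int) (jump : Int) : Nat → Int
  | 0 => jump
  | fuel + 1 =>
      if coords.all (fun obstacle => !(PySem.Int.mod obstacle jump == 0)) then jump
      else pvWhileA coords (jump + 1) fuel

def pvFuelA (xs : List Int) : Nat := xs.foldr (fun x m => max x.natAbs m) 0 + 2

def solution (inputArray : List Int) : Int :=
  pvWhileA (PySem.List.sorted inputArray (fun x => x) false) 1 (pvFuelA inputArray)

-- ===== PORT B =====
-- Python's `while d * d <= n` loop; fuel (n + 1).toNat always suffices from d = 1.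
def pvDivLoop (n : Int) (d : Int) (divs : PySem.Set Int) : Nat → PySem.Set Int
  | 0 => divs
  | fuel + 1 =>
      if d * d ≤ n then
        pvDivLoop n (d + 1)
          (if PySem.Int.mod n d == 0 then
            PySem.Set.add (PySem.Set.add divs d) (PySem.Int.floordiv n d)
          else divs) fuel
      else divs

def pvDivisors (xs : List Int) : PySem.Set Int :=
  xs.foldl (fun divs x => pvDivLoop |x| 1 divs (|x| + 1).toNat) PySem.Set.empty

-- Python's `while j in divisors` loop; fuel |divisors| + 1 provably suffices.
def pvMex (divs : PySem.Set Int) (j : Int) : Nat → Int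
  | 0 => j
  | fuel + 1 => if PySem.Set.contains divs j then pvMex divs (j + 1) fuel else j

def solution_alt (inputArray : List Int) : Int :=
  let divs := pvDivisors inputArray
  pvMex divs 1 (divs.length + 1)

-- ===== PRECONDITION & SPEC =====
-- Pre_ excludes lists containing 0: there A's `while True` loops forever (0 % jump == 0
-- for every jump), so A never returns a value on those inputs.
def Pre_solution (inputArray : List Int) : Prop := (0 : Int) ∉ inputArray
instance (inputArray : List Int) : Decidable (Pre_solution inputArray) := by unfold Pre_solution; infer_instance
def pvWitness_solution : List Int := [3, 5, -6]
def Spec_solution (inputArray : List Int) (out : Int) : Prop := out = solution_alt inputArray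
instance (inputArray : List Int) (out : Int) : Decidable (Spec_solution inputArray out) := by unfold Spec_solution; infer_instance

-- ===== CLAIM (what is proved, stated in full; the proofs are below) =====
def Claim_equal_solution : Prop := ∀ (inputArray : List Int), Dom_solution inputArray → Pre_solution inputArray → Spec_solution inputArray (solution inputArray)

-- ===== LEMMAS AND PROOFS =====

-- the arithmetic heart: the trial-division enumeration reaches exactly the divisors
theorem pv_div_wit_iff (n j : Int) (hn : 0 ≤ n) (hj : 1 ≤ j) :
    (∃ e : Int, 1 ≤ e ∧ e * e ≤ n ∧ PySem.Int.mod n e = 0 ∧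
      (j = e ∨ j = PySem.Int.floordiv n e)) ↔ (j ∣ n ∧ 1 ≤ n) := by
  constructor
  · rintro ⟨e, he1, he2, hmod, hje⟩
    have hdvd : e ∣ n := (PySem.Int.mod_eq_zero_iff_dvd n e).1 hmod
    have hn1 : 1 ≤ n := by nlinarith
    refine ⟨?_, hn1⟩
    rcases hje with rfl | rfl
    · exact hdvd
    · obtain ⟨k, rfl⟩ := hdvd
      rw [PySem.Int.floordiv_eq_ediv_of_pos (by omega : (0:ℤ) < e),
        Int.mul_ediv_cancel_left k (by omega : e ≠ 0)]
      exact Dvd.intro_left e rfl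
  · rintro ⟨⟨k, hk⟩, hn1⟩
    have hk1 : 1 ≤ k := by nlinarith
    by_cases hsq : j * j ≤ n
    · exact ⟨j, hj, hsq, (PySem.Int.mod_eq_zero_iff_dvd n j).2 ⟨k, hk⟩, Or.inl rfl⟩
    · refine ⟨k, hk1, by nlinarith, (PySem.Int.mod_eq_zero_iff_dvd n k).2 ⟨j, by linarith [hk, mul_comm j k]⟩, Or.inr ?_⟩
      rw [PySem.Int.floordiv_eq_ediv_of_pos (by omega), hk, mul_comm j k,
        Int.mul_ediv_cancel_left j (by omega)]

theorem pv_mem_divLoop (n : Int) (j : Int) :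
    ∀ (fuel : Nat) (d : Int) (divs : PySem.Set Int), 1 ≤ d → (n + 1 - d).toNat ≤ fuel →
    (j ∈ pvDivLoop n d divs fuel ↔ j ∈ divs ∨
      ∃ e : Int, d ≤ e ∧ e * e ≤ n ∧ PySem.Int.mod n e = 0 ∧
        (j = e ∨ j = PySem.Int.floordiv n e)) := by
  intro fuel
  induction fuel with
  | zero =>
    intro d divs hd hfuel
    simp only [pvDivLoop]
    constructor
    · exact Or.inl
    · rintro (h | ⟨e, he1, he2, _⟩)
      · exact h
      · exfalso
        have hnd : n + 1 ≤ d := by omega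
        nlinarith [he1, he2, hnd, hd]
  | succ fuel ih =>
    intro d divs hd hfuel
    simp only [pvDivLoop]
    by_cases hdn : d * d ≤ n
    · rw [if_pos hdn]
      have hdlen : d ≤ n := by nlinarith
      rw [ih (d + 1) _ (by omega) (by omega)]
      by_cases hmod : PySem.Int.mod n d = 0
      · simp only [hmod, beq_self_eq_true, if_pos, PySem.Set.mem_add]
        constructor
        · rintro (((h | h) | h) | ⟨e, he1, he2, he3, he4⟩)
          · exact Or.inl h
          · exact Or.inr ⟨d, le_refl d, hdn, hmod, Or.inl h⟩
          · exact Or.inr ⟨d, le_refl d, hdn, hmod, Or.inr h⟩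
          · exact Or.inr ⟨e, by omega, he2, he3, he4⟩
        · rintro (h | ⟨e, he1, he2, he3, he4⟩)
          · exact Or.inl (Or.inl (Or.inl h))
          · rcases eq_or_lt_of_le he1 with rfl | hlt
            · rcases he4 with rfl | rfl
              · exact Or.inl (Or.inl (Or.inr rfl))
              · exact Or.inl (Or.inr rfl)
            · exact Or.inr ⟨e, by omega, he2, he3, he4⟩
      · have : (PySem.Int.mod n d == 0) = false := by
          simp [hmod]
        rw [this]
        simp only [Bool.false_eq_true, if_false]
        constructor
        · rintro (h | ⟨e, he1, he2, he3, he4⟩)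
          · exact Or.inl h
          · exact Or.inr ⟨e, by omega, he2, he3, he4⟩
        · rintro (h | ⟨e, he1, he2, he3, he4⟩)
          · exact Or.inl h
          · rcases eq_or_lt_of_le he1 with rfl | hlt
            · exact absurd he3 hmod
            · exact Or.inr ⟨e, by omega, he2, he3, he4⟩
    · rw [if_neg hdn]
      constructor
      · exact Or.inl
      · rintro (h | ⟨e, he1, he2, _⟩)
        · exact h
        · exfalso; nlinarith [he1, he2, hd]

theorem pv_mem_divisors_core (xs : List Int) (j : Int) (hj : 1 ≤ j) :
    ∀ (acc : PySem.Set Int),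
    (j ∈ xs.foldl (fun divs x => pvDivLoop |x| 1 divs (|x| + 1).toNat) acc ↔
      j ∈ acc ∨ ∃ x ∈ xs, x ≠ 0 ∧ j ∣ |x|) := by
  induction xs with
  | nil => intro acc; simp
  | cons y ys ih =>
    intro acc
    simp only [List.foldl_cons, ih, List.mem_cons]
    rw [pv_mem_divLoop |y| j _ 1 acc (le_refl 1) (by omega)]
    rw [pv_div_wit_iff |y| j (abs_nonneg y) hj]
    constructor
    · rintro ((h | ⟨h1, h2⟩) | ⟨x, hx, hx0, hxd⟩)
      · exact Or.inl h
      · exact Or.inr ⟨y, Or.inl rfl, abs_pos.mp (by linarith), h1⟩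
      · exact Or.inr ⟨x, Or.inr hx, hx0, hxd⟩
    · rintro (h | ⟨x, (rfl | hx), hx0, hxd⟩)
      · exact Or.inl (Or.inl h)
      · exact Or.inl (Or.inr ⟨hxd, by have := abs_pos.mpr hx0; linarith⟩)
      · exact Or.inr ⟨x, hx, hx0, hxd⟩

theorem pv_mem_divisors (xs : List Int) (j : Int) (hj : 1 ≤ j) :
    j ∈ pvDivisors xs ↔ ∃ x ∈ xs, x ≠ 0 ∧ j ∣ |x| := by
  rw [pvDivisors, pv_mem_divisors_core xs j hj PySem.Set.empty]
  simp [PySem.Set.empty]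

-- the two searches agree: same predicate (on jumps ≥ j), a common stopper within both fuels
theorem pv_search_eq (coords : List Int) (divs : PySem.Set Int) :
    ∀ (f1 : Nat) (j s : Int) (f2 : Nat),
    (∀ k, j ≤ k → (coords.all fun o => !(PySem.Int.mod o k == 0)) = !(PySem.Set.contains divs k)) →
    j ≤ s → ((coords.all fun o => !(PySem.Int.mod o s == 0)) = true) →
    s < j + f1 → s < j + f2 →
    pvWhileA coords j f1 = pvMex divs j f2 := by
  intro f1
  induction f1 with
  | zero => intro j s f2 _ hs _ hf1 _; omega
  | succ f1 ih =>
    intro j s f2 hpq hs hps hf1 hf2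
    cases f2 with
    | zero => exfalso; omega
    | succ f2 =>
      simp only [pvWhileA, pvMex]
      by_cases hj : (coords.all fun o => !(PySem.Int.mod o j == 0)) = true
      · have hcf : PySem.Set.contains divs j = false := by
          have h := (hpq j (le_refl j)).symm.trans hj
          cases hc : PySem.Set.contains divs j
          · rfl
          · rw [hc] at h; simp at h
        rw [if_pos hj, if_neg (by rw [hcf]; decide)]
      · have hcont : PySem.Set.contains divs j = true := by
          cases hc : PySem.Set.contains divs j
          · exact absurd ((hpq j (le_refl j)).trans (by rw [hc]; rfl)) hj
          · rfl
        rw [if_neg hj, if_pos hcont]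
        have hsj : j ≠ s := by rintro rfl; exact hj hps
        exact ih (j + 1) s f2 (fun k hk => hpq k (by omega)) (by omega) hps (by omega) (by omega)

-- every obstacle's magnitude is bounded by the fold maximum used as fuel
theorem pv_le_foldr_max (xs : List Int) (x : Int) (hx : x ∈ xs) :
    x.natAbs ≤ xs.foldr (fun y m => max y.natAbs m) 0 := by
  induction xs with
  | nil => cases hx
  | cons y ys ih =>
    rcases List.mem_cons.mp hx with rfl | h
    · simp
    · simp only [List.foldr_cons]; exact le_trans (ih h) (le_max_right _ _)

-- pigeonhole: some j in [1, |divs|+1] is missing from the nodup list divs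
theorem pv_mex_exists (divs : PySem.Set Int) :
    ∃ s : Int, 1 ≤ s ∧ s ≤ (divs.length : Int) + 1 ∧ s ∉ divs := by
  by_contra h
  push Not at h
  have hsub : List.map (fun i : Nat => (i : Int) + 1) (List.range (divs.length + 1)) ⊆ divs := by
    intro z hz
    rw [List.mem_map] at hz
    obtain ⟨i, hi, rfl⟩ := hz
    rw [List.mem_range] at hi
    exact h ((i : Int) + 1) (by omega) (by omega)
  have hnd' : (List.map (fun i : Nat => (i : Int) + 1) (List.range (divs.length + 1))).Nodup := by
    refine List.Nodup.map ?_ List.nodup_range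
    intro a b hab
    simp only [add_left_inj, Nat.cast_inj] at hab
    exact hab
  have hlen := (List.subperm_of_subset hnd' hsub).length_le
  rw [List.length_map, List.length_range] at hlen
  omega

theorem solution_eq_alt (xs : List Int) (hpre : (0 : Int) ∉ xs) :
    solution xs = solution_alt xs := by
  rw [solution, solution_alt]
  set coords := PySem.List.sorted xs (fun x => x) false with hcoords
  set divs := pvDivisors xs with hdivs
  -- predicate agreement for jumps k ≥ 1
  have hagree : ∀ k : Int, (1 : Int) ≤ k →
      (coords.all fun o => !(PySem.Int.mod o k == 0)) = !(PySem.Set.contains divs k) := by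
    intro k hk
    have hmem : PySem.Set.contains divs k = true ↔ ∃ x ∈ xs, x ≠ 0 ∧ k ∣ |x| := by
      rw [PySem.Set.contains_iff, hdivs, pv_mem_divisors xs k hk]
    cases hall : (coords.all fun o => !(PySem.Int.mod o k == 0))
    · -- some obstacle is divisible by k
      rw [List.all_eq_false] at hall
      obtain ⟨o, ho, hdv⟩ := hall
      rw [PySem.List.mem_sorted] at ho
      have hod : k ∣ o := by
        apply (PySem.Int.mod_eq_zero_iff_dvd o k).1
        by_contra hne
        exact hdv (by simp [hne])
      have : PySem.Set.contains divs k = true :=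
        hmem.2 ⟨o, ho, fun h0 => hpre (h0 ▸ ho), (dvd_abs k o).mpr hod⟩
      rw [this]
      rfl
    · -- no obstacle is divisible by k
      have : PySem.Set.contains divs k = false := by
        cases hc : PySem.Set.contains divs k
        · rfl
        · obtain ⟨x, hx, _, hdx⟩ := hmem.1 hc
          have hdvx : k ∣ x := (dvd_abs k x).mp hdx
          simp only [List.all_eq_true] at hall
          have := hall x (by rw [PySem.List.mem_sorted]; exact hx)
          rw [(PySem.Int.mod_eq_zero_iff_dvd x k).2 hdvx] at this
          simp at this
      rw [this]
      rfl
  -- stopper for A: M + 1, where M bounds every |obstacle|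
  obtain ⟨s2, hs21, hs2len, hs2mem⟩ := pv_mex_exists divs
  have hs2p : (coords.all fun o => !(PySem.Int.mod o s2 == 0)) = true := by
    rw [hagree s2 hs21]
    cases hc : PySem.Set.contains divs s2
    · rfl
    · exact absurd ((PySem.Set.contains_iff divs s2).1 hc) hs2mem
  set M : Nat := xs.foldr (fun x m => max x.natAbs m) 0 with hM
  have hs1p : (coords.all fun o => !(PySem.Int.mod o ((M : Int) + 1) == 0)) = true := by
    simp only [List.all_eq_true, Bool.not_eq_true']
    intro o ho
    rw [PySem.List.mem_sorted] at ho
    cases h : PySem.Int.mod o ((M : Int) + 1) == 0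
    · rfl
    · exfalso
      have hdv : ((M : Int) + 1) ∣ o := (PySem.Int.mod_eq_zero_iff_dvd o _).1 (by simpa using h)
      have ho0 : o ≠ 0 := fun h0 => hpre (h0 ▸ ho)
      have hle : (M : Int) + 1 ≤ |o| := Int.le_of_dvd (abs_pos.mpr ho0) ((dvd_abs _ o).mpr hdv)
      have hbound := pv_le_foldr_max xs o ho
      rw [Int.abs_eq_natAbs] at hle
      omega
  -- pick the smaller of the two stoppers (both satisfy A's predicate)
  by_cases hcmp : (M : Int) + 1 ≤ s2
  · exact pv_search_eq coords divs (pvFuelA xs) 1 ((M : Int) + 1) (divs.length + 1)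
      hagree (by omega) hs1p (by rw [pvFuelA]; push_cast; omega) (by push_cast; omega)
  · exact pv_search_eq coords divs (pvFuelA xs) 1 s2 (divs.length + 1)
      hagree hs21 hs2p (by rw [pvFuelA]; push_cast; omega) (by push_cast; omega)

-- ===== VERDICT (by name: the statement is the Claim_ definition above) =====
theorem solution_spec : Claim_equal_solution := by
  intro xs _ hpre
  unfold Spec_solution
  exact solution_eq_alt xs hpre
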